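-- pv_equiv track=rewrite | github.com/leidc024/Thesis | scripts/01_find_ambiguous_pairs.py | classify_ambiguity_type
-- ===== SOURCE A (Python) =====
-- def classify_ambiguity_type(words):
--     """
--     Determines what type of ambiguity causes these words to map to same Baybayin.
--     Returns: 'E/I', 'O/U', 'D/R', 'COMBINED', or 'UNKNOWN'
--     """
--     has_e_i = False
--     has_o_u = False
--     has_d_r = False
--
--     # Compare all pairs to find differences
--     for i in range(len(words)):
--         for j in range(i + 1, len(words)):
--             word1 = words[i].lower()
--             word2 = words[j].lower()
--
--             if len(word1) != len(word2):
--                 continue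
--
--             for c1, c2 in zip(word1, word2):
--                 if c1 != c2:
--                     if (c1 in 'ei' and c2 in 'ei') or (c1 in 'ie' and c2 in 'ie'):
--                         has_e_i = True
--                     elif (c1 in 'ou' and c2 in 'ou') or (c1 in 'uo' and c2 in 'uo'):
--                         has_o_u = True
--                     elif (c1 in 'dr' and c2 in 'dr') or (c1 in 'rd' and c2 in 'rd'):
--                         has_d_r = True
--
--     # Determine classification
--     types = []
--     if has_e_i:
--         types.append('E/I')
--     if has_o_u:
--         types.append('O/U')
--     if has_d_r:
--         types.append('D/R')
--
--     if len(types) == 0: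
--         return 'UNKNOWN'
--     elif len(types) == 1:
--         return types[0]
--     else:
--         return 'COMBINED'
-- ===== SOURCE B (Python) =====
-- def classify_ambiguity_type(words):
--     """
--     Determines what type of ambiguity causes these words to map to same Baybayin.
--     Returns: 'E/I', 'O/U', 'D/R', 'COMBINED', or 'UNKNOWN'
--     """
--     # Group lowered words by length once; words of different lengths never interact.
--     groups = {}
--     for w in words:
--         lw = w.lower()
--         groups.setdefault(len(lw), []).append(lw)
--
--     # For every group with at least two words, collect the set of characters
--     # seen at each position ("column").  Two same-length words differ with an
--     # e/i (o/u, d/r) swap at some position iff both letters occur in a column.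
--     columns = []
--     for group in groups.values():
--         if len(group) < 2:
--             continue
--         for pos in range(len(group[0])):
--             columns.append({w[pos] for w in group})
--
--     tests = [('E/I', 'e', 'i'), ('O/U', 'o', 'u'), ('D/R', 'd', 'r')]
--     found = [label for label, a, b in tests
--              if any(a in col and b in col for col in columns)]
--
--     if not found:
--         return 'UNKNOWN'
--     if len(found) == 1:
--         return found[0]
--     return 'COMBINED'
-- ===== Notes on version B (the rewrite author's own statement) =====
-- stated objective: faster
-- what changed: Replaced the O(n^2) all-pairs character comparison by grouping lowered words by length once and testing, per character position, whether both letters of each ambiguous pair occur in that column's character set.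
import Mathlib
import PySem

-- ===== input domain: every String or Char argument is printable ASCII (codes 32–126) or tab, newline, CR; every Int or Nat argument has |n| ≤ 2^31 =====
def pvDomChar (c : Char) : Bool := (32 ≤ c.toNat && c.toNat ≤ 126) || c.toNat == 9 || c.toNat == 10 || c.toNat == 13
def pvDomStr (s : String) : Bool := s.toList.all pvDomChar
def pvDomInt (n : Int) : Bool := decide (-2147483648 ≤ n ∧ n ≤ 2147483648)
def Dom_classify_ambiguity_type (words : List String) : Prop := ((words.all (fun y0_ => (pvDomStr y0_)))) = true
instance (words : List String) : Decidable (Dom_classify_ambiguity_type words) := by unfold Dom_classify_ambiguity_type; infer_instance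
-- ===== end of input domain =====

-- B replaces A's O(n^2) all-pairs scan by grouping lowered words by length and
-- checking, per character position, whether both letters of a pair co-occur.

-- ===== PORT A =====
-- Python 'c in "ei"' for a single char c
def pvIn (c : Char) (s : List Char) : Bool := s.contains c

-- the body of A's inner 'for c1, c2 in zip(word1, word2)' loop (state = (has_e_i, has_o_u, has_d_r))
def pvStep (st : Bool × Bool × Bool) (p : Char × Char) : Bool × Bool × Bool :=
  if p.1 ≠ p.2 then
    if (pvIn p.1 ['e','i'] && pvIn p.2 ['e','i']) || (pvIn p.1 ['i','e'] && pvIn p.2 ['i','e']) then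
      (true, st.2.1, st.2.2)
    else if (pvIn p.1 ['o','u'] && pvIn p.2 ['o','u']) || (pvIn p.1 ['u','o'] && pvIn p.2 ['u','o']) then
      (st.1, true, st.2.2)
    else if (pvIn p.1 ['d','r'] && pvIn p.2 ['d','r']) || (pvIn p.1 ['r','d'] && pvIn p.2 ['r','d']) then
      (st.1, st.2.1, true)
    else st
  else st

def classify_ambiguity_type (words : List String) : String :=
  let n : Int := words.length
  let st := (PySem.List.pyRange 0 n 1).foldl (fun st i =>
      (PySem.List.pyRange (i+1) n 1).foldl (fun st j =>
        let word1 := (PySem.Str.lower (PySem.List.pyGetD words i "")).toList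
        let word2 := (PySem.Str.lower (PySem.List.pyGetD words j "")).toList
        if word1.length ≠ word2.length then st
        else (word1.zip word2).foldl pvStep st) st)
    ((false, false, false) : Bool × Bool × Bool)
  let types : List String :=
    (if st.1 then ["E/I"] else []) ++ (if st.2.1 then ["O/U"] else []) ++ (if st.2.2 then ["D/R"] else [])
  if types.length = 0 then "UNKNOWN"
  else if types.length = 1 then PySem.List.pyGetD types 0 ""
  else "COMBINED"

-- ===== PORT B =====
def classify_ambiguity_type_alt (words : List String) : String :=
  let groups : PySem.Dict Int (List (List Char)) :=
    words.foldl (fun d w =>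
      let lw := (PySem.Str.lower w).toList
      d.modify (lw.length : Int) [] (fun g => g ++ [lw])) PySem.Dict.empty
  let columns : List (PySem.Set Char) :=
    groups.values.foldl (fun cols group =>
      if group.length < 2 then cols
      else cols ++ (PySem.List.pyRange 0 ((PySem.List.pyGetD group 0 []).length : Int) 1).map
        (fun pos => PySem.Set.ofList (group.map (fun w => PySem.List.pyGetD w pos ' ')))) []
  let tests : List (String × Char × Char) := [("E/I", 'e', 'i'), ("O/U", 'o', 'u'), ("D/R", 'd', 'r')]
  let found := (tests.filter (fun t => columns.any (fun col => col.contains t.2.1 && col.contains t.2.2))).map (·.1)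
  if found.isEmpty then "UNKNOWN"
  else if found.length = 1 then found.headD ""
  else "COMBINED"

-- ===== PRECONDITION & SPEC =====
def Spec_classify_ambiguity_type (words : List String) (out : String) : Prop := out = classify_ambiguity_type_alt words
instance (words : List String) (out : String) : Decidable (Spec_classify_ambiguity_type words out) := by unfold Spec_classify_ambiguity_type; infer_instance

-- ===== CLAIM (what is proved, stated in full; the proofs are below) =====
def Claim_equal_classify_ambiguity_type : Prop := ∀ (words : List String), Dom_classify_ambiguity_type words → Spec_classify_ambiguity_type words (classify_ambiguity_type words)

-- ===== LEMMAS AND PROOFS =====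

-- {p.1, p.2} = {a, b} as an unordered pair of distinct letters
def pvMatch (a b : Char) (p : Char × Char) : Bool := (p.1 == a && p.2 == b) || (p.1 == b && p.2 == a)

def pvLower (w : String) : List Char := (PySem.Str.lower w).toList

-- two same-length words that differ at some position by an a/b swap
def pvHitPair (a b : Char) (w1 w2 : List Char) : Bool :=
  (w1.length == w2.length) && (w1.zip w2).any (pvMatch a b)

-- the flag A's pair loop computes for letter pair (a, b)
def pvFlagA (a b : Char) (words : List String) : Bool :=
  (PySem.List.pyRange 0 (words.length : Int) 1).any (fun i =>
    (PySem.List.pyRange (i+1) (words.length : Int) 1).any (fun j =>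
      pvHitPair a b (pvLower (PySem.List.pyGetD words i "")) (pvLower (PySem.List.pyGetD words j ""))))

def pvGroups (words : List String) : PySem.Dict Int (List (List Char)) :=
  words.foldl (fun d w =>
    d.modify (((PySem.Str.lower w).toList.length : Int)) [] (fun g => g ++ [(PySem.Str.lower w).toList])) PySem.Dict.empty

def pvColumns (words : List String) : List (PySem.Set Char) :=
  (pvGroups words).values.foldl (fun cols group =>
    if group.length < 2 then cols
    else cols ++ (PySem.List.pyRange 0 ((PySem.List.pyGetD group 0 []).length : Int) 1).map
      (fun pos => PySem.Set.ofList (group.map (fun w => PySem.List.pyGetD w pos ' ')))) []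

-- the flag B's column test computes for letter pair (a, b)
def pvFlagB (a b : Char) (words : List String) : Bool :=
  (pvColumns words).any (fun col => col.contains a && col.contains b)

def pvOutA (b1 b2 b3 : Bool) : String :=
  let types : List String :=
    (if b1 then ["E/I"] else []) ++ (if b2 then ["O/U"] else []) ++ (if b3 then ["D/R"] else [])
  if types.length = 0 then "UNKNOWN"
  else if types.length = 1 then PySem.List.pyGetD types 0 ""
  else "COMBINED"

def pvOutB (b1 b2 b3 : Bool) : String :=
  let found : List String :=
    (if b1 then ["E/I"] else []) ++ (if b2 then ["O/U"] else []) ++ (if b3 then ["D/R"] else [])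
  if found.isEmpty then "UNKNOWN"
  else if found.length = 1 then found.headD ""
  else "COMBINED"

theorem pvStep_eq (st : Bool × Bool × Bool) (p : Char × Char) :
    pvStep st p = (st.1 || pvMatch 'e' 'i' p, st.2.1 || pvMatch 'o' 'u' p, st.2.2 || pvMatch 'd' 'r' p) := by
  obtain ⟨c1, c2⟩ := p
  simp only [pvStep, pvIn, pvMatch, List.contains_cons, List.contains_nil, Bool.or_false]
  by_cases h1 : c1 = 'e' <;> by_cases h2 : c2 = 'e' <;> by_cases h3 : c1 = 'i' <;> by_cases h4 : c2 = 'i' <;>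
    by_cases h5 : c1 = 'o' <;> by_cases h6 : c2 = 'o' <;> by_cases h7 : c1 = 'u' <;> by_cases h8 : c2 = 'u' <;>
    simp_all
  all_goals (by_cases h9 : c1 = 'd' <;> by_cases h10 : c2 = 'd' <;> by_cases h11 : c1 = 'r' <;> by_cases h12 : c2 = 'r' <;> simp_all [beq_eq_decide])

theorem pv_foldl_or3 {α : Type} (f1 f2 f3 : α → Bool) (l : List α) (st : Bool × Bool × Bool) :
    l.foldl (fun st x => (st.1 || f1 x, st.2.1 || f2 x, st.2.2 || f3 x)) st
      = (st.1 || l.any f1, st.2.1 || l.any f2, st.2.2 || l.any f3) := by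
  induction l generalizing st with
  | nil => simp
  | cons x xs ih => simp [List.foldl_cons, ih, List.any_cons, Bool.or_assoc]

theorem pv_foldl_pvStep (l : List (Char × Char)) (st : Bool × Bool × Bool) :
    l.foldl pvStep st = (st.1 || l.any (pvMatch 'e' 'i'), st.2.1 || l.any (pvMatch 'o' 'u'), st.2.2 || l.any (pvMatch 'd' 'r')) := by
  induction l generalizing st with
  | nil => simp
  | cons p t ih => rw [List.foldl_cons, pvStep_eq, ih]; simp [List.any_cons, Bool.or_assoc]

theorem pv_body_eq (w1 w2 : List Char) :
    (fun (st : Bool × Bool × Bool) => if w1.length ≠ w2.length then st else (w1.zip w2).foldl pvStep st)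
      = fun st => (st.1 || pvHitPair 'e' 'i' w1 w2, st.2.1 || pvHitPair 'o' 'u' w1 w2, st.2.2 || pvHitPair 'd' 'r' w1 w2) := by
  funext st
  by_cases h : w1.length = w2.length
  · simp [h, pv_foldl_pvStep, pvHitPair]
  · simp [h, pvHitPair, beq_eq_decide]

theorem pv_A_char (words : List String) :
    classify_ambiguity_type words =
      pvOutA (pvFlagA 'e' 'i' words) (pvFlagA 'o' 'u' words) (pvFlagA 'd' 'r' words) := by
  have hst : (PySem.List.pyRange 0 (words.length : Int) 1).foldl (fun st i =>
      (PySem.List.pyRange (i+1) (words.length : Int) 1).foldl (fun st j =>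
        if (PySem.Str.lower (PySem.List.pyGetD words i "")).toList.length ≠
           (PySem.Str.lower (PySem.List.pyGetD words j "")).toList.length then st
        else ((PySem.Str.lower (PySem.List.pyGetD words i "")).toList.zip
              (PySem.Str.lower (PySem.List.pyGetD words j "")).toList).foldl pvStep st) st)
      ((false, false, false) : Bool × Bool × Bool)
      = (pvFlagA 'e' 'i' words, pvFlagA 'o' 'u' words, pvFlagA 'd' 'r' words) := by
    have hinner : ∀ i : Int, (fun (st : Bool × Bool × Bool) (j : Int) =>
        if (PySem.Str.lower (PySem.List.pyGetD words i "")).toList.length ≠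
           (PySem.Str.lower (PySem.List.pyGetD words j "")).toList.length then st
        else ((PySem.Str.lower (PySem.List.pyGetD words i "")).toList.zip
              (PySem.Str.lower (PySem.List.pyGetD words j "")).toList).foldl pvStep st)
        = fun st j => (st.1 || pvHitPair 'e' 'i' (pvLower (PySem.List.pyGetD words i "")) (pvLower (PySem.List.pyGetD words j "")),
            st.2.1 || pvHitPair 'o' 'u' (pvLower (PySem.List.pyGetD words i "")) (pvLower (PySem.List.pyGetD words j "")),
            st.2.2 || pvHitPair 'd' 'r' (pvLower (PySem.List.pyGetD words i "")) (pvLower (PySem.List.pyGetD words j ""))) := by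
      intro i
      funext st j
      exact congrFun (pv_body_eq _ _) st
    simp only [hinner, pv_foldl_or3]
    simp only [Bool.false_or]
    rfl
  simp only [classify_ambiguity_type]
  rw [hst]
  rfl
theorem pv_B_char (words : List String) :
    classify_ambiguity_type_alt words =
      pvOutB (pvFlagB 'e' 'i' words) (pvFlagB 'o' 'u' words) (pvFlagB 'd' 'r' words) := by
  have h : classify_ambiguity_type_alt words =
      (let found := (([("E/I", 'e', 'i'), ("O/U", 'o', 'u'), ("D/R", 'd', 'r')] : List (String × Char × Char)).filter
          (fun t => pvFlagB t.2.1 t.2.2 words)).map (·.1)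
       if found.isEmpty then "UNKNOWN"
       else if found.length = 1 then found.headD ""
       else "COMBINED") := rfl
  rw [h]
  cases hb1 : pvFlagB 'e' 'i' words <;> cases hb2 : pvFlagB 'o' 'u' words <;> cases hb3 : pvFlagB 'd' 'r' words <;>
    simp [List.filter, pvOutB, hb1, hb2, hb3]
theorem pv_out_eq (b1 b2 b3 : Bool) : pvOutA b1 b2 b3 = pvOutB b1 b2 b3 := by
  cases b1 <;> cases b2 <;> cases b3 <;> rfl

theorem pvMatch_iff (a b : Char) (p : Char × Char) :
    pvMatch a b p = true ↔ (p.1 = a ∧ p.2 = b) ∨ (p.1 = b ∧ p.2 = a) := by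
  simp [pvMatch]

theorem pvHitPair_iff (a b : Char) (w1 w2 : List Char) :
    pvHitPair a b w1 w2 = true ↔
      w1.length = w2.length ∧ ∃ (k : Nat) (h1 : k < w1.length) (h2 : k < w2.length),
        pvMatch a b (w1[k], w2[k]) = true := by
  simp only [pvHitPair, Bool.and_eq_true, beq_iff_eq, List.any_eq_true]
  constructor
  · rintro ⟨hlen, p, hp, hm⟩
    obtain ⟨k, hk, hkp⟩ := List.mem_iff_getElem.mp hp
    rw [List.length_zip] at hk
    refine ⟨hlen, k, by omega, by omega, ?_⟩
    rw [show (w1[k], w2[k]) = (w1.zip w2)[k] from (List.getElem_zip).symm]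
    rwa [hkp]
  · rintro ⟨hlen, k, h1, h2, hm⟩
    refine ⟨hlen, (w1[k], w2[k]), ?_, hm⟩
    have hkz : k < (w1.zip w2).length := by simp [List.length_zip]; omega
    rw [show (w1[k], w2[k]) = (w1.zip w2)[k] from (List.getElem_zip).symm]
    exact List.getElem_mem _
theorem pv_flagA_iff (a b : Char) (words : List String) :
    pvFlagA a b words = true ↔
      ∃ (i j : Nat) (hi : i < words.length) (hj : j < words.length), i < j ∧
        pvHitPair a b (pvLower words[i]) (pvLower words[j]) = true := by
  unfold pvFlagA
  simp only [List.any_eq_true, PySem.List.mem_pyRange_one]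
  constructor
  · rintro ⟨i, ⟨hi0, hin⟩, j, ⟨hj1, hjn⟩, h⟩
    refine ⟨i.toNat, j.toNat, by omega, by omega, by omega, ?_⟩
    rw [PySem.List.pyGetD_eq_getElem _ _ hi0 hin, PySem.List.pyGetD_eq_getElem _ _ (by omega) hjn] at h
    exact h
  · rintro ⟨i, j, hi, hj, hij, h⟩
    refine ⟨(i : Int), ⟨by omega, by omega⟩, (j : Int), ⟨by omega, by omega⟩, ?_⟩
    rw [PySem.List.pyGetD_eq_getElem _ _ (by omega) (by omega),
        PySem.List.pyGetD_eq_getElem _ _ (by omega) (by omega)]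
    simpa using h
theorem pv_keys (words : List String) :
    (pvGroups words).keys = PySem.Set.ofList (words.map (fun w => ((pvLower w).length : Int))) := by
  have h := PySem.Dict.keys_foldl_modify_key (κ := Int) (ν := List (List Char)) words
    (fun w => (((PySem.Str.lower w).toList.length : Int))) []
    (fun _ w => fun g => g ++ [(PySem.Str.lower w).toList]) PySem.Dict.empty
  rw [PySem.Dict.keys_empty, PySem.Set.update_nil_left] at h
  exact h

theorem pv_nodup_keys (words : List String) : (pvGroups words).keys.Nodup := by
  exact PySem.Dict.nodup_keys_foldl_modify_key words
    (fun w => (((PySem.Str.lower w).toList.length : Int))) []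
    (fun _ w => fun g => g ++ [(PySem.Str.lower w).toList]) PySem.Dict.empty (by simp [PySem.Dict.keys_empty])

theorem pv_getD (words : List String) (ℓ : Int) :
    (pvGroups words).getD ℓ [] = (words.map pvLower).filter (fun w => ((w.length : Int) == ℓ)) := by
  have hpairs : pvGroups words =
      (words.map (fun w => (((pvLower w).length : Int), pvLower w))).foldl
        (fun d p => d.modify p.1 [] (fun x => x ++ [p.2])) PySem.Dict.empty := by
    rw [List.foldl_map]
    rfl
  rw [hpairs]
  rw [PySem.Dict.getD_foldl_modify_append]
  rw [PySem.Dict.getD_empty, List.nil_append, List.filter_map, List.map_map, List.filter_map]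
  rfl

theorem pv_mem_values (words : List String) (g : List (List Char)) :
    g ∈ (pvGroups words).values ↔
      ∃ ℓ : Int, ℓ ∈ words.map (fun w => ((pvLower w).length : Int)) ∧
        g = (words.map pvLower).filter (fun w => ((w.length : Int) == ℓ)) := by
  rw [PySem.Dict.values_eq_map_keys (pvGroups words) (pv_nodup_keys words) []]
  rw [pv_keys words]
  constructor
  · intro h
    obtain ⟨ℓ, hℓ, rfl⟩ := List.mem_map.mp h
    exact ⟨ℓ, (PySem.Set.mem_ofList _ _).mp hℓ, (pv_getD words ℓ)⟩
  · rintro ⟨ℓ, hmem, rfl⟩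
    exact List.mem_map.mpr ⟨ℓ, (PySem.Set.mem_ofList _ _).mpr hmem, (pv_getD words ℓ)⟩
theorem pv_columns_eq (words : List String) :
    pvColumns words = (pvGroups words).values.flatMap (fun group =>
      if group.length < 2 then []
      else (PySem.List.pyRange 0 ((PySem.List.pyGetD group 0 []).length : Int) 1).map
        (fun pos => PySem.Set.ofList (group.map (fun w => PySem.List.pyGetD w pos ' ')))) := by
  unfold pvColumns
  have h : (fun (cols : List (PySem.Set Char)) (group : List (List Char)) =>
      if group.length < 2 then cols
      else cols ++ (PySem.List.pyRange 0 ((PySem.List.pyGetD group 0 []).length : Int) 1).map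
        (fun pos => PySem.Set.ofList (group.map (fun w => PySem.List.pyGetD w pos ' '))))
    = (fun cols group => cols ++ (if group.length < 2 then []
      else (PySem.List.pyRange 0 ((PySem.List.pyGetD group 0 []).length : Int) 1).map
        (fun pos => PySem.Set.ofList (group.map (fun w => PySem.List.pyGetD w pos ' '))))) := by
    funext cols group
    split <;> simp
  rw [h, PySem.List.foldl_append_eq_flatMap, List.nil_append]

theorem pv_flagB_iff (a b : Char) (words : List String) :
    pvFlagB a b words = true ↔
      ∃ g ∈ (pvGroups words).values, ¬ (g.length < 2) ∧
        ∃ pos : Int, 0 ≤ pos ∧ pos < ((PySem.List.pyGetD g 0 []).length : Int) ∧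
          (∃ w ∈ g, PySem.List.pyGetD w pos ' ' = a) ∧ (∃ w ∈ g, PySem.List.pyGetD w pos ' ' = b) := by
  unfold pvFlagB
  rw [pv_columns_eq]
  simp only [List.any_eq_true, List.mem_flatMap, Bool.and_eq_true,
    PySem.Set.contains_iff]
  constructor
  · rintro ⟨col, ⟨g, hg, hcol⟩, hca, hcb⟩
    by_cases hlen : g.length < 2
    · simp [hlen] at hcol
    · simp only [hlen, if_false] at hcol
      obtain ⟨pos, hpos, hcoleq⟩ := List.mem_map.mp hcol
      rw [PySem.List.mem_pyRange_one] at hpos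
      obtain ⟨hp0, hplt⟩ := hpos
      rw [← hcoleq, PySem.Set.mem_ofList] at hca hcb
      obtain ⟨wa, hwa, hwaeq⟩ := List.mem_map.mp hca
      obtain ⟨wb, hwb, hwbeq⟩ := List.mem_map.mp hcb
      exact ⟨g, hg, hlen, pos, hp0, hplt, ⟨wa, hwa, hwaeq⟩, ⟨wb, hwb, hwbeq⟩⟩
  · rintro ⟨g, hg, hlen, pos, hp0, hplt, ⟨wa, hwa, hwaeq⟩, ⟨wb, hwb, hwbeq⟩⟩
    refine ⟨PySem.Set.ofList (g.map (fun w => PySem.List.pyGetD w pos ' ')), ⟨g, hg, ?_⟩, ?_, ?_⟩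
    · simp only [hlen, if_false]
      exact List.mem_map.mpr ⟨pos, by simp [PySem.List.mem_pyRange_one]; omega, rfl⟩
    · rw [PySem.Set.mem_ofList]; exact List.mem_map.mpr ⟨wa, hwa, hwaeq⟩
    · rw [PySem.Set.mem_ofList]; exact List.mem_map.mpr ⟨wb, hwb, hwbeq⟩
theorem pv_two_mem {α : Type} {l : List α} {u v : α} (hu : u ∈ l) (hv : v ∈ l) (huv : u ≠ v) :
    2 ≤ l.length := by
  match l with
  | [] => simp at hu
  | [x] => simp_all
  | x :: y :: t => simp [List.length_cons]

theorem pv_pair_indices {α : Type} {l : List α} {u v : α} (hu : u ∈ l) (hv : v ∈ l) (huv : u ≠ v) :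
    ∃ (i j : Nat) (hi : i < l.length) (hj : j < l.length), i < j ∧
      ((l[i] = u ∧ l[j] = v) ∨ (l[i] = v ∧ l[j] = u)) := by
  obtain ⟨i, hi, hiu⟩ := List.mem_iff_getElem.mp hu
  obtain ⟨j, hj, hjv⟩ := List.mem_iff_getElem.mp hv
  have hij : i ≠ j := by rintro rfl; exact huv (hiu ▸ hjv ▸ rfl)
  rcases Nat.lt_or_ge i j with h | h
  · exact ⟨i, j, hi, hj, h, Or.inl ⟨hiu, hjv⟩⟩
  · exact ⟨j, i, hj, hi, by omega, Or.inr ⟨hjv, hiu⟩⟩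

theorem pv_group_len {words : List String} {ℓ : Int} {w : List Char}
    (hw : w ∈ (words.map pvLower).filter (fun w => ((w.length : Int) == ℓ))) :
    w ∈ words.map pvLower ∧ (w.length : Int) = ℓ := by
  obtain ⟨h1, h2⟩ := List.mem_filter.mp hw
  exact ⟨h1, by simpa using h2⟩

theorem pv_flag_bridge (a b : Char) (hab : a ≠ b) (words : List String) :
    pvFlagA a b words = pvFlagB a b words := by
  have hiff : pvFlagA a b words = true ↔ pvFlagB a b words = true := by
    rw [pv_flagA_iff, pv_flagB_iff]
    constructor
    · -- A → B
      rintro ⟨i, j, hi, hj, hij, hp⟩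
      rw [pvHitPair_iff] at hp
      obtain ⟨hlen, k, hk1, hk2, hm⟩ := hp
      rw [pvMatch_iff] at hm
      have hm' : ((pvLower words[i])[k] = a ∧ (pvLower words[j])[k] = b) ∨
                 ((pvLower words[i])[k] = b ∧ (pvLower words[j])[k] = a) := hm
      clear hm
      obtain ⟨ℓ, hℓ⟩ : ∃ ℓ : Int, ℓ = ((pvLower words[i]).length : Int) := ⟨_, rfl⟩
      obtain ⟨g, hgdef⟩ : ∃ g, g = (words.map pvLower).filter (fun w => ((w.length : Int) == ℓ)) := ⟨_, rfl⟩
      have hw1g : pvLower words[i] ∈ g := by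
        rw [hgdef]
        exact List.mem_filter.mpr ⟨List.mem_map.mpr ⟨words[i], List.getElem_mem hi, rfl⟩, by rw [hℓ]; simp⟩
      have hw2g : pvLower words[j] ∈ g := by
        rw [hgdef]
        exact List.mem_filter.mpr ⟨List.mem_map.mpr ⟨words[j], List.getElem_mem hj, rfl⟩, by rw [hℓ]; simp [hlen]⟩
      have hne : pvLower words[i] ≠ pvLower words[j] := by
        intro hEq
        rcases hm' with ⟨h1, h2⟩ | ⟨h1, h2⟩ <;> simp only [hEq] at h1
        · exact hab (h1.symm.trans h2)
        · exact hab (h2.symm.trans h1)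
      have hglen : 2 ≤ g.length := pv_two_mem hw1g hw2g hne
      have hg0 : PySem.List.pyGetD g 0 [] ∈ g := PySem.List.pyGetD_mem g [] (by constructor <;> omega)
      have hg0' : PySem.List.pyGetD g 0 [] ∈ (words.map pvLower).filter (fun w => ((w.length : Int) == ℓ)) := by
        rw [← hgdef]; exact hg0
      have hg0len : ((PySem.List.pyGetD g 0 []).length : Int) = ℓ := (pv_group_len hg0').2
      refine ⟨g, ?_, by omega, (k : Int), by omega, by rw [hg0len, hℓ]; exact_mod_cast hk1, ?_, ?_⟩
      · rw [pv_mem_values]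
        exact ⟨ℓ, List.mem_map.mpr ⟨words[i], List.getElem_mem hi, hℓ.symm⟩, hgdef⟩
      · rcases hm' with ⟨h1, _⟩ | ⟨_, h2⟩
        · exact ⟨_, hw1g, by rw [PySem.List.pyGetD_natCast, List.getD_eq_getElem _ _ hk1]; exact h1⟩
        · exact ⟨_, hw2g, by rw [PySem.List.pyGetD_natCast, List.getD_eq_getElem _ _ hk2]; exact h2⟩
      · rcases hm' with ⟨_, h2⟩ | ⟨h1, _⟩
        · exact ⟨_, hw2g, by rw [PySem.List.pyGetD_natCast, List.getD_eq_getElem _ _ hk2]; exact h2⟩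
        · exact ⟨_, hw1g, by rw [PySem.List.pyGetD_natCast, List.getD_eq_getElem _ _ hk1]; exact h1⟩
    · -- B → A
      rintro ⟨g, hgval, hglen2, pos, hp0, hplt, ⟨wa, hwa, hwaval⟩, ⟨wb, hwb, hwbval⟩⟩
      obtain ⟨ℓ, hℓmem, hgeq⟩ := (pv_mem_values words g).mp hgval
      have hwalen : (wa.length : Int) = ℓ := (pv_group_len (hgeq ▸ hwa)).2
      have hwblen : (wb.length : Int) = ℓ := (pv_group_len (hgeq ▸ hwb)).2
      have hglen : 2 ≤ g.length := by omega
      have hg0 : PySem.List.pyGetD g 0 [] ∈ g := PySem.List.pyGetD_mem g [] (by constructor <;> omega)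
      have hg0' : PySem.List.pyGetD g 0 [] ∈ (words.map pvLower).filter (fun w => ((w.length : Int) == ℓ)) := by
        rw [← hgeq]; exact hg0
      have hg0len : ((PySem.List.pyGetD g 0 []).length : Int) = ℓ := (pv_group_len hg0').2
      obtain ⟨k, hkdef⟩ : ∃ k : Nat, (k : Int) = pos := ⟨pos.toNat, by omega⟩
      subst hkdef
      have hka : k < wa.length := by omega
      have hkb : k < wb.length := by omega
      have hwak : wa[k] = a := by rw [← hwaval, PySem.List.pyGetD_natCast, List.getD_eq_getElem _ _ hka]
      have hwbk : wb[k] = b := by rw [← hwbval, PySem.List.pyGetD_natCast, List.getD_eq_getElem _ _ hkb]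
      have hwab : wa ≠ wb := by
        intro hEq
        simp only [hEq] at hwak
        exact hab (hwak.symm.trans hwbk)
      have hwa' : wa ∈ words.map pvLower := (pv_group_len (hgeq ▸ hwa)).1
      have hwb' : wb ∈ words.map pvLower := (pv_group_len (hgeq ▸ hwb)).1
      obtain ⟨i, j, hi, hj, hij, hcase⟩ := pv_pair_indices hwa' hwb' hwab
      have hlenm : (words.map pvLower).length = words.length := List.length_map ..
      have hgeti : (words.map pvLower)[i] = pvLower words[i] := List.getElem_map ..
      have hgetj : (words.map pvLower)[j] = pvLower words[j] := List.getElem_map ..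
      refine ⟨i, j, by omega, by omega, hij, ?_⟩
      rw [pvHitPair_iff]
      rcases hcase with ⟨hiu, hjv⟩ | ⟨hiv, hju⟩
      · have e1 : pvLower words[i] = wa := by rw [← hgeti]; exact hiu
        have e2 : pvLower words[j] = wb := by rw [← hgetj]; exact hjv
        refine ⟨by rw [e1, e2]; omega, k, by rw [e1]; omega, by rw [e2]; omega, ?_⟩
        rw [pvMatch_iff]
        left
        exact ⟨by simp only [e1]; exact hwak, by simp only [e2]; exact hwbk⟩
      · have e1 : pvLower words[i] = wb := by rw [← hgeti]; exact hiv
        have e2 : pvLower words[j] = wa := by rw [← hgetj]; exact hju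
        refine ⟨by rw [e1, e2]; omega, k, by rw [e1]; omega, by rw [e2]; omega, ?_⟩
        rw [pvMatch_iff]
        right
        exact ⟨by simp only [e1]; exact hwbk, by simp only [e2]; exact hwak⟩
  cases hA : pvFlagA a b words <;> cases hB : pvFlagB a b words <;> simp_all
theorem pv_main (words : List String) :
    classify_ambiguity_type words = classify_ambiguity_type_alt words := by
  rw [pv_A_char, pv_B_char,
    pv_flag_bridge 'e' 'i' (by decide) words,
    pv_flag_bridge 'o' 'u' (by decide) words,
    pv_flag_bridge 'd' 'r' (by decide) words,
    pv_out_eq]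

-- ===== VERDICT (by name: the statement is the Claim_ definition above) =====
theorem classify_ambiguity_type_spec : Claim_equal_classify_ambiguity_type := by
  intro words _
  exact pv_main words
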